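-- pv_equiv track=rewrite | github.com/Biggeorgian/COMM_x_GITA | 05 - Lesson/08 - Pyramide.py | pyramide
-- ===== SOURCE A (Python) =====
-- def pyramide(numbers_list):
--     pyramide_data = {}
--     step = 1
--     active_row = numbers_list
--
--     while len(active_row) > 0:
--         pyramide_data[str(step)] = active_row
--         if len(active_row) == 1:
--             break
--
--         next_row = [active_row[i] + active_row[i + 1] for i in range(len(active_row) - 1)]
--         active_row = next_row
--         step += 1
--
--     return pyramide_data
-- ===== SOURCE B (Python) =====
-- def pyramide(numbers_list):
--     def build(row, step):
--         if not row:
--             return {}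
--         d = {str(step): row}
--         if len(row) > 1:
--             d.update(build([a + b for a, b in zip(row, row[1:])], step + 1))
--         return d
--     return build(numbers_list, 1)
-- ===== Notes on version B (the rewrite author's own statement) =====
-- stated objective: alternative
-- what changed: Replaced A's imperative while-loop that mutates a dict and computes adjacent sums by indexing over range(len-1) with a recursive helper that builds each row's dict entry and merges the recursively built rest, computing adjacent sums via zip(row, row[1:]).
import Mathlib
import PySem

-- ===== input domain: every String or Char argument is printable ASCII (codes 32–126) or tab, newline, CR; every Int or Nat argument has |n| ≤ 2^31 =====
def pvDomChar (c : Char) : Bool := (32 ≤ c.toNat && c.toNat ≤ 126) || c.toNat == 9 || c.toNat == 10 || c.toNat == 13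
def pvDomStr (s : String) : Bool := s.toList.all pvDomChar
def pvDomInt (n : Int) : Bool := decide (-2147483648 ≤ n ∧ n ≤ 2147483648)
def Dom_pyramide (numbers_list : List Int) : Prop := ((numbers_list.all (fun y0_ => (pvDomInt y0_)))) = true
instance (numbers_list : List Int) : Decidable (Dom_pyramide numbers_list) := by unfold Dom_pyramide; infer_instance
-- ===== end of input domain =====

-- B re-decomposes A's while-loop as a recursion over rows (adjacent sums via zip); return values proved equal.

-- ===== PORT A =====
-- next_row = [active_row[i] + active_row[i + 1] for i in range(len(active_row) - 1)]
-- (every index is provably in range, so the pyGetD default 0 is never used)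
def pyNextRow (row : List Int) : List Int :=
  (PySem.List.pyRange 0 ((row.length : Int) - 1) 1).map
    (fun i => PySem.List.pyGetD row i 0 + PySem.List.pyGetD row (i + 1) 0)

theorem pyNextRow_length (row : List Int) : (pyNextRow row).length = row.length - 1 := by
  simp [pyNextRow, PySem.List.length_pyRange_one]

-- the while loop, state (pyramide_data, step, active_row)
def pyLoop (data : PySem.Dict String (List Int)) (step : Int) (row : List Int) :
    PySem.Dict String (List Int) :=
  if _h : row.length > 0 then
    let data' := data.insert (PySem.Int.toStr step) row
    if row.length = 1 then data'
    else pyLoop data' (step + 1) (pyNextRow row)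
  else data
termination_by row.length
decreasing_by
  rw [pyNextRow_length]; omega

def pyramide (numbers_list : List Int) : List (String × List Int) :=
  (pyLoop PySem.Dict.empty 1 numbers_list).items

-- ===== PORT B =====
-- def build(row, step): {} if empty; {str(step): row} merged with build of the zip-adjacent-sum row
def build (row : List Int) (step : Int) : List (String × List Int) :=
  match row with
  | [] => []
  | [x] => [(PySem.Int.toStr step, [x])]
  | x :: y :: rest =>
      (PySem.Int.toStr step, x :: y :: rest) ::
        build (List.zipWith (· + ·) (x :: y :: rest) (y :: rest)) (step + 1)
termination_by row.length
decreasing_by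
  simp [List.length_zipWith]

def pyramide_alt (numbers_list : List Int) : List (String × List Int) :=
  build numbers_list 1

-- ===== PRECONDITION & SPEC =====
def Spec_pyramide (numbers_list : List Int) (out : List (String × List Int)) : Prop := out = pyramide_alt numbers_list
instance (numbers_list : List Int) (out : List (String × List Int)) : Decidable (Spec_pyramide numbers_list out) := by unfold Spec_pyramide; infer_instance

-- ===== CLAIM (what is proved, stated in full; the proofs are below) =====
def Claim_equal_pyramide : Prop := ∀ (numbers_list : List Int), Dom_pyramide numbers_list → Spec_pyramide numbers_list (pyramide numbers_list)

-- ===== LEMMAS AND PROOFS =====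

-- str injectivity on the step counters
theorem digitChar_inj {a b : Nat} (ha : a < 10) (hb : b < 10)
    (h : Nat.digitChar a = Nat.digitChar b) : a = b := by
  interval_cases a <;> interval_cases b <;> simp_all [Nat.digitChar]

theorem toDigits_ten_inj : ∀ (n m : Nat), Nat.toDigits 10 n = Nat.toDigits 10 m → n = m := by
  intro n
  induction n using Nat.strong_induction_on with
  | _ n ih =>
    intro m h
    have hN := Nat.toDigits_eq_if (b := 10) (n := n) (by omega)
    have hM := Nat.toDigits_eq_if (b := 10) (n := m) (by omega)
    rw [hN] at h
    rw [hM] at h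
    by_cases hn : n < 10 <;> by_cases hm : m < 10 <;> simp only [hn, hm, if_true, if_false] at h
    · exact digitChar_inj hn hm (List.cons.injEq _ _ _ _ ▸ h).1
    · exfalso
      have hlen := congrArg List.length h
      have hp := @Nat.length_toDigits_pos 10 (m / 10)
      simp only [List.length_cons, List.length_nil, List.length_append] at hlen
      omega
    · exfalso
      have hlen := congrArg List.length h
      have hp := @Nat.length_toDigits_pos 10 (n / 10)
      simp only [List.length_cons, List.length_nil, List.length_append] at hlen
      omega
    · have h2 := List.append_inj' h (by simp)
      have hdiv : n / 10 = m / 10 := ih (n / 10) (by omega) _ h2.1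
      have hmod : n % 10 = m % 10 :=
        digitChar_inj (Nat.mod_lt _ (by omega)) (Nat.mod_lt _ (by omega))
          (by simpa using h2.2)
      omega

theorem toStr_inj_nonneg {a b : Int} (ha : 0 ≤ a) (hb : 0 ≤ b)
    (h : PySem.Int.toStr a = PySem.Int.toStr b) : a = b := by
  unfold PySem.Int.toStr PySem.Int.toChars at h
  rw [if_neg (by omega), if_neg (by omega)] at h
  have hl : Nat.toDigits 10 a.toNat = Nat.toDigits 10 b.toNat := by
    have := congrArg String.toList h
    simpa using this
  have := toDigits_ten_inj _ _ hl
  omega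

theorem nextRow_eq (row : List Int) :
    pyNextRow row = List.zipWith (· + ·) row row.tail := by
  apply List.ext_getElem
  · rw [pyNextRow_length]
    simp [List.length_zipWith, List.length_tail]
  · intro k h1 h2
    rw [pyNextRow_length] at h1
    simp only [pyNextRow, PySem.List.pyRange_one, List.map_map, List.getElem_map,
      List.getElem_range, List.getElem_zipWith, Function.comp, List.getElem_tail]
    have hk1 : k < row.length := by omega
    have hk2 : k + 1 < row.length := by omega
    have e1 : ((0:Int) + (k:Int)) = ((k : Nat) : Int) := by omega
    rw [e1]
    have e2 : ((k:Int) + 1) = (((k + 1 : Nat)) : Int) := by push_cast; ring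
    rw [e2, PySem.List.pyGetD_natCast, PySem.List.pyGetD_natCast]
    simp [List.getD, hk1, hk2]

theorem loop_eq (n : Nat) : ∀ (row : List Int), row.length = n →
    ∀ (step : Int) (data : PySem.Dict String (List Int)), 1 ≤ step →
    (∀ j : Int, step ≤ j → data.contains (PySem.Int.toStr j) = false) →
    (pyLoop data step row).items = data.items ++ build row step := by
  induction n using Nat.strong_induction_on with
  | _ n ih =>
    intro row hlen step data hstep hfresh
    match row with
    | [] => rw [pyLoop]; simp [build]
    | [x] =>
        rw [pyLoop]
        have hins : (data.insert (PySem.Int.toStr step) [x]).items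
            = data.items ++ [(PySem.Int.toStr step, [x])] :=
          PySem.Dict.items_insert_of_not_contains _ _ (hfresh step le_rfl)
        simp [build, hins]
    | x :: y :: rest =>
        rw [pyLoop]
        simp only [List.length_cons, gt_iff_lt, dif_pos (by omega : 0 < rest.length + 1 + 1),
          if_neg (by omega : ¬ rest.length + 1 + 1 = 1)]
        rw [ih ((pyNextRow (x :: y :: rest)).length)
              (by rw [pyNextRow_length]; simp at hlen ⊢; omega)
              _ rfl (step + 1) _ (by omega)
              (by
                intro j hj
                rw [PySem.Dict.contains_insert]
                have hne : PySem.Int.toStr j ≠ PySem.Int.toStr step := by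
                  intro he
                  have := toStr_inj_nonneg (by omega) (by omega) he
                  omega
                simp [hne]
                exact hfresh j (by omega))]
        rw [PySem.Dict.items_insert_of_not_contains _ _ (hfresh step le_rfl)]
        rw [nextRow_eq]
        simp [build, List.tail]

-- ===== VERDICT (by name: the statement is the Claim_ definition above) =====
theorem pyramide_spec : Claim_equal_pyramide := by
  intro numbers_list _
  unfold Spec_pyramide pyramide pyramide_alt
  rw [loop_eq numbers_list.length numbers_list rfl 1 PySem.Dict.empty le_rfl
        (by intro j _; simp [PySem.Dict.contains_empty])]
  simp [PySem.Dict.empty]
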